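-- pv_equiv track=rewrite | github.com/skarl/event_deduplication | src/event_dedup/canonical/synthesizer.py | _select_most_frequent
-- ===== SOURCE A (Python) =====
-- from collections import Counter
--
-- def _select_most_frequent(
--     events: list[dict], field: str
-- ) -> tuple[str | None, str]:
--     """Select the most common non-empty value for *field*.
--
--     Ties are broken by first occurrence.
--
--     Returns:
--         Tuple of (value, source_event_id_of_first_occurrence).
--     """
--     counter: Counter[str] = Counter()
--     first_src: dict[str, str] = {}
--
--     for e in events:
--         val = e.get(field)
--         if val:
--             counter[val] += 1
--             if val not in first_src:
--                 first_src[val] = e.get("id", "unknown")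
--
--     if not counter:
--         return None, events[0].get("id", "unknown")
--
--     most_common_val = counter.most_common(1)[0][0]
--     return most_common_val, first_src[most_common_val]
-- ===== SOURCE B (Python) =====
-- def _select_most_frequent(events, field):
--     """Most common non-empty value for *field*; ties by first occurrence.
--
--     One counting pass (plain dict, no first-occurrence table), then a second
--     pass over events returning the first event whose value attains the
--     maximum count: that event is that value's first occurrence.
--     """
--     counts = {}
--     for e in events:
--         val = e.get(field)
--         if val:
--             counts[val] = counts.get(val, 0) + 1
--     if not counts:
--         return None, events[0].get("id", "unknown")
--     best = max(counts.values())
--     for e in events: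
--         val = e.get(field)
--         if val and counts[val] == best:
--             return val, e.get("id", "unknown")
-- ===== Notes on version B (the rewrite author's own statement) =====
-- stated objective: simpler
-- what changed: Replaces A's Counter plus maintained first-occurrence dict and stable most_common sort by one plain count dict and a second in-order pass that returns the first event attaining the maximum count (that event is necessarily the winning value's first occurrence).
-- outside the precondition, e.g. on _select_most_frequent([], 'x'): A raises IndexError, B raises IndexError
import Mathlib
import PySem

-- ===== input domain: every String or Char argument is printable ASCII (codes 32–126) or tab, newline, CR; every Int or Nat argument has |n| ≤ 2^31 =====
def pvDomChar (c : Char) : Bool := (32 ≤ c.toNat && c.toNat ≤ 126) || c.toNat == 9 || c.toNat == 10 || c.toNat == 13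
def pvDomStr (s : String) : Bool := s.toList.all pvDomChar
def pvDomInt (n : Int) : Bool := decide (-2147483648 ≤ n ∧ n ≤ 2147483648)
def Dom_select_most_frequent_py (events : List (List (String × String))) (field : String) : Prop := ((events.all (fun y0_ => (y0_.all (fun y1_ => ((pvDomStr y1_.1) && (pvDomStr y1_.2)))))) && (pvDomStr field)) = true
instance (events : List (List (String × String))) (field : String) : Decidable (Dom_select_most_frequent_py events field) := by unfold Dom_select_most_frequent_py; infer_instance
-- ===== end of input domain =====

-- B replaces A's Counter + maintained first-occurrence dict by one plain count pass plus a
-- second in-order scan for the first event attaining the maximum count (objective: simpler).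

-- shared helper: Python's e.get(k) on an association list (first match), and e.get("id","unknown")
def pyGetStr (e : List (String × String)) (k : String) : Option String :=
  (e.find? (fun p => p.1 == k)).map (fun p => p.2)

def pyIdOf (e : List (String × String)) : String :=
  (pyGetStr e "id").getD "unknown"

-- ===== PORT A =====
def select_most_frequent_py (events : List (List (String × String))) (field : String) : Option String × String :=
  let st := events.foldl
    (fun (st : PySem.Dict String Int × PySem.Dict String String) e =>
      match pyGetStr e field with
      | some v =>
        if v ≠ "" then
          (st.1.modify v 0 (· + 1),
           if st.2.contains v then st.2 else st.2.insert v (pyIdOf e))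
        else st
      | none => st)
    (PySem.Dict.empty, PySem.Dict.empty)
  if st.1.size = 0 then
    -- events[0].get("id", "unknown"); events = [] (IndexError) is excluded by Pre_
    (none, pyIdOf (PySem.List.pyGetD events 0 []))
  else
    -- counter.most_common(1) = sorted(counter.items(), key=count, reverse=True)[:1] (stable)
    match PySem.List.pyGet? (PySem.List.sorted st.1.items (fun p => p.2) true) 0 with
    | some p => (some p.1, st.2.getD p.1 "")  -- first_src[most_common_val]; the key is always present here
    | none => (none, "")                      -- unreachable: the counter is nonempty

-- ===== PORT B =====
-- second pass: first event whose field value is truthy and has count == best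
def bScan (counts : PySem.Dict String Int) (field : String) (best : Int) :
    List (List (String × String)) → Option String × String
  | [] => (none, "")   -- unreachable: best is attained by some event
  | e :: rest =>
    match pyGetStr e field with
    | some v =>
      if v ≠ "" ∧ counts.getD v 0 = best then (some v, pyIdOf e)
      else bScan counts field best rest
    | none => bScan counts field best rest

def select_most_frequent_py_alt (events : List (List (String × String))) (field : String) : Option String × String :=
  let counts := events.foldl
    (fun (d : PySem.Dict String Int) e =>
      match pyGetStr e field with
      | some v => if v ≠ "" then d.insert v (d.getD v 0 + 1) else d
      | none => d)
    PySem.Dict.empty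
  if counts.size = 0 then
    (none, pyIdOf (PySem.List.pyGetD events 0 []))
  else
    let best := match PySem.List.max? counts.values (fun x => x) with
      | some b => b
      | none => 0   -- unreachable: counts is nonempty
    bScan counts field best events

-- ===== PRECONDITION & SPEC =====
-- Pre_ excludes only the empty event list, on which A raises IndexError (events[0]).
def Pre_select_most_frequent_py (events : List (List (String × String))) (field : String) : Prop :=
  events ≠ []
instance (events : List (List (String × String))) (field : String) : Decidable (Pre_select_most_frequent_py events field) := by unfold Pre_select_most_frequent_py; infer_instance

def pvWitness_select_most_frequent_py : (List (List (String × String))) × String :=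
  ([[("id", "e1"), ("x", "a")], [("id", "e2"), ("x", "a")]], "x")

def Spec_select_most_frequent_py (events : List (List (String × String))) (field : String) (out : Option String × String) : Prop := out = select_most_frequent_py_alt events field
instance (events : List (List (String × String))) (field : String) (out : Option String × String) : Decidable (Spec_select_most_frequent_py events field out) := by unfold Spec_select_most_frequent_py; infer_instance

-- ===== CLAIM (what is proved, stated in full; the proofs are below) =====
def Claim_equal_select_most_frequent_py : Prop := ∀ (events : List (List (String × String))) (field : String), Dom_select_most_frequent_py events field → Pre_select_most_frequent_py events field → Spec_select_most_frequent_py events field (select_most_frequent_py events field)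

-- ===== LEMMAS AND PROOFS =====

-- the (value, source-id) pair an event contributes, if its field value is truthy
def extract (field : String) (e : List (String × String)) : Option (String × String) :=
  match pyGetStr e field with
  | some v => if v ≠ "" then some (v, pyIdOf e) else none
  | none => none

-- running "first maximum" (what the head of a stable reverse sort is)
def rmax (key : α → Int) (x : α) (xs : List α) : α :=
  xs.foldl (fun m y => if key m < key y then y else m) x

theorem aFold_eq (field : String) (events : List (List (String × String)))
    (st : PySem.Dict String Int × PySem.Dict String String) :
    events.foldl
      (fun (st : PySem.Dict String Int × PySem.Dict String String) e =>
        match pyGetStr e field with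
        | some v =>
          if v ≠ "" then
            (st.1.modify v 0 (· + 1),
             if st.2.contains v then st.2 else st.2.insert v (pyIdOf e))
          else st
        | none => st) st
    = ((events.filterMap (extract field)).foldl (fun c p => c.modify p.1 0 (· + 1)) st.1,
       (events.filterMap (extract field)).foldl
         (fun f p => if f.contains p.1 then f else f.insert p.1 p.2) st.2) := by
  induction events generalizing st with
  | nil => rfl
  | cons e rest ih =>
    simp only [List.foldl_cons, List.filterMap_cons, extract]
    cases h : pyGetStr e field with
    | none => exact ih st
    | some v =>
      by_cases hv : v = "" <;> simp only [hv, ne_eq, not_true_eq_false, if_false,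
        not_false_eq_true, if_true, List.foldl_cons]
      · exact ih st
      · exact ih _

theorem bFold_eq (field : String) (events : List (List (String × String)))
    (d : PySem.Dict String Int) :
    events.foldl
      (fun (d : PySem.Dict String Int) e =>
        match pyGetStr e field with
        | some v => if v ≠ "" then d.insert v (d.getD v 0 + 1) else d
        | none => d) d
    = (events.filterMap (extract field)).foldl (fun c p => c.modify p.1 0 (· + 1)) d := by
  induction events generalizing d with
  | nil => rfl
  | cons e rest ih =>
    simp only [List.foldl_cons, List.filterMap_cons, extract]
    cases h : pyGetStr e field with
    | none => exact ih d
    | some v =>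
      by_cases hv : v = "" <;> simp only [hv, ne_eq, not_true_eq_false, if_false,
        not_false_eq_true, if_true, List.foldl_cons]
      · exact ih d
      · exact ih _

theorem cFold_counter (ps : List (String × String)) :
    ps.foldl (fun (c : PySem.Dict String Int) p => c.modify p.1 0 (· + 1)) PySem.Dict.empty
    = PySem.Dict.counter (ps.map Prod.fst) := by
  rw [PySem.Dict.counter_eq_foldl, List.foldl_map]

theorem fFold_get? (ps : List (String × String)) (f : PySem.Dict String String) (v : String) :
    (ps.foldl (fun f p => if f.contains p.1 then f else f.insert p.1 p.2) f).get? v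
    = (f.get? v).or ((ps.find? (fun p => p.1 == v)).map (fun p => p.2)) := by
  induction ps generalizing f with
  | nil => cases h : f.get? v <;> simp [h]
  | cons p ps ih =>
    simp only [List.foldl_cons]
    by_cases hc : f.contains p.1 = true
    · rw [if_pos hc, ih]
      by_cases hpv : p.1 = v
      · have : (f.get? v).isSome := by
          rw [← hpv, ← PySem.Dict.contains_eq_isSome_get?]; exact hc
        obtain ⟨w, hw⟩ := Option.isSome_iff_exists.mp this
        simp [hw]
      · rw [List.find?_cons_of_neg (by simpa using hpv)]
    · rw [if_neg hc, ih]
      have hfnone : f.get? p.1 = none := by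
        cases hg : f.get? p.1 with
        | none => rfl
        | some w => rw [PySem.Dict.contains_eq_isSome_get?, hg] at hc; simp at hc
      by_cases hpv : p.1 = v
      · subst hpv
        rw [PySem.Dict.get?_insert_self, hfnone,
          List.find?_cons_of_pos (by simp)]
        simp
      · rw [PySem.Dict.get?_insert_of_ne _ _ (fun h => hpv h.symm),
          List.find?_cons_of_neg (by simpa using hpv)]

theorem bScan_eq (counts : PySem.Dict String Int) (field : String) (best : Int)
    (events : List (List (String × String))) :
    bScan counts field best events
    = match (events.filterMap (extract field)).find? (fun p => decide (counts.getD p.1 0 = best)) with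
      | some p => (some p.1, p.2)
      | none => (none, "") := by
  induction events with
  | nil => rfl
  | cons e rest ih =>
    simp only [bScan, List.filterMap_cons, extract]
    cases h : pyGetStr e field with
    | none => exact ih
    | some v =>
      by_cases hv : v = ""
      · simp only [hv, ne_eq, not_true_eq_false, false_and, if_false]
        exact ih
      · simp only [hv, ne_eq, not_false_eq_true, true_and, if_true]
        by_cases hb : counts.getD v 0 = best
        · rw [if_pos hb, List.find?_cons_of_pos (by simpa using hb)]
        · rw [if_neg hb, List.find?_cons_of_neg (by simpa using hb)]
          exact ih

theorem head?_foldl_insertBy (bef : α → α → Bool) (xs : List α) (acc : List α) (m : α)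
    (h : acc.head? = some m) :
    ((xs.foldl (fun a x => PySem.List.insertBy bef x a) acc).head?)
    = some (xs.foldl (fun m x => if bef x m then x else m) m) := by
  induction xs generalizing acc m with
  | nil => simpa using h
  | cons x xs ih =>
    cases acc with
    | nil => simp at h
    | cons a t =>
      simp only [List.head?_cons, Option.some.injEq] at h
      subst h
      simp only [List.foldl_cons]
      cases hb : bef x a with
      | true =>
        have hi : PySem.List.insertBy bef x (a :: t) = x :: a :: t := by
          simp [PySem.List.insertBy, hb]
        rw [hi, if_pos rfl, ih _ _ rfl]
      | false =>
        have hi : PySem.List.insertBy bef x (a :: t) = a :: PySem.List.insertBy bef x t := by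
          simp [PySem.List.insertBy, hb]
        rw [hi, if_neg (by simp), ih _ _ rfl]

theorem rmax_le (key : α → Int) (x : α) (xs : List α) :
    ∀ y ∈ x :: xs, key y ≤ key (rmax key x xs) := by
  induction xs generalizing x with
  | nil => simp [rmax]
  | cons z xs ih =>
    intro y hy
    have hstep : rmax key x (z :: xs) = rmax key (if key x < key z then z else x) xs := rfl
    rw [hstep]
    have hx' : key x ≤ key (if key x < key z then z else x) := by split <;> omega
    have hz' : key z ≤ key (if key x < key z then z else x) := by split <;> omega
    have hhead := ih (if key x < key z then z else x) _ (List.mem_cons_self ..)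
    rcases List.mem_cons.mp hy with rfl | hy'
    · omega
    rcases List.mem_cons.mp hy' with rfl | hy''
    · omega
    · exact ih _ _ (List.mem_cons_of_mem _ hy'')

theorem rmax_mem (key : α → Int) (x : α) (xs : List α) : rmax key x xs ∈ x :: xs := by
  induction xs generalizing x with
  | nil => simp [rmax]
  | cons z xs ih =>
    have hstep : rmax key x (z :: xs) = rmax key (if key x < key z then z else x) xs := rfl
    rw [hstep]
    have := ih (if key x < key z then z else x)
    rcases List.mem_cons.mp this with h | h
    · rw [h]; split <;> simp
    · exact List.mem_cons_of_mem _ (List.mem_cons_of_mem _ h)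

theorem rmax_find? (key : α → Int) (x : α) (xs : List α) :
    (x :: xs).find? (fun y => key y == key (rmax key x xs)) = some (rmax key x xs) := by
  induction xs generalizing x with
  | nil => simp [rmax]
  | cons z xs ih =>
    have hstep : rmax key x (z :: xs) = rmax key (if key x < key z then z else x) xs := rfl
    by_cases hxz : key x < key z
    · rw [hstep, if_pos hxz]
      have hle : key z ≤ key (rmax key z xs) := rmax_le key z xs z (List.mem_cons_self ..)
      rw [List.find?_cons_of_neg (by simp; omega)]
      exact ih z
    · rw [hstep, if_neg hxz]
      have hle : key x ≤ key (rmax key x xs) := rmax_le key x xs x (List.mem_cons_self ..)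
      by_cases hx : key x = key (rmax key x xs)
      · have hihx := ih x
        rw [List.find?_cons_of_pos (by simp [hx])] at hihx
        rw [List.find?_cons_of_pos (by simp [hx])]
        exact hihx
      · have hz : key z ≠ key (rmax key x xs) := by omega
        have hihx := ih x
        rw [List.find?_cons_of_neg (by simp [hx])] at hihx
        rw [List.find?_cons_of_neg (by simp [hx]), List.find?_cons_of_neg (by simp [hz])]
        exact hihx

theorem update_find?_of_found (q : String → Bool) (vs s : List String) (v : String)
    (h : s.find? q = some v) : (PySem.Set.update s vs).find? q = some v := by
  induction vs generalizing s with
  | nil => rw [PySem.Set.update_nil]; exact h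
  | cons w vs ih =>
    rw [PySem.Set.update_cons]
    apply ih
    simp only [PySem.Set.add]
    split
    · exact h
    · rw [List.find?_append, h]; rfl

theorem update_find? (q : String → Bool) (vs s : List String)
    (h : ∀ x ∈ s, q x = false) :
    (PySem.Set.update s vs).find? q = vs.find? q := by
  induction vs generalizing s with
  | nil => rw [PySem.Set.update_nil, List.find?_eq_none.mpr (fun x hx => by simp [h x hx])]; rfl
  | cons w vs ih =>
    rw [PySem.Set.update_cons]
    cases hq : q w with
    | false =>
      rw [List.find?_cons_of_neg (by simp [hq])]
      apply ih
      intro x hx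
      simp only [PySem.Set.add] at hx
      split at hx
      · exact h x hx
      · rcases List.mem_append.mp hx with hx' | hx'
        · exact h x hx'
        · simp only [List.mem_singleton] at hx'; rw [hx']; exact hq
    | true =>
      rw [List.find?_cons_of_pos (by simp [hq])]
      have hw : s.contains w = false := by
        cases hc : List.contains s w with
        | false => rfl
        | true =>
          have := h w ((List.contains_iff_mem).mp hc)
          rw [this] at hq; cases hq
      apply update_find?_of_found
      simp only [PySem.Set.add, PySem.Set.contains, hw, Bool.false_eq_true, if_false]
      rw [List.find?_append, List.find?_eq_none.mpr (fun x hx => by simp [h x hx])]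
      simp [hq]

theorem find?_of_imp (p q : α → Bool) (l : List α) (a : α)
    (himp : ∀ x, q x = true → p x = true) (hp : l.find? p = some a) (hq : q a = true) :
    l.find? q = some a := by
  induction l with
  | nil => simp at hp
  | cons x l ih =>
    cases hpx : p x with
    | true =>
      rw [List.find?_cons_of_pos hpx] at hp
      injection hp with hp; subst hp
      rw [List.find?_cons_of_pos hq]
    | false =>
      rw [List.find?_cons_of_neg (by simp [hpx])] at hp
      have hqx : q x = false := by
        cases hqx : q x with
        | false => rfl
        | true => rw [himp x hqx] at hpx; cases hpx
      rw [List.find?_cons_of_neg (by simp [hqx])]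
      exact ih hp

-- ===== VERDICT (by name: the statement is the Claim_ definition above) =====
theorem rmax_eq_foldl_decide (key : α → Int) (x : α) (xs : List α) :
    xs.foldl (fun m y => if decide (key m < key y) = true then y else m) x = rmax key x xs := by
  simp [rmax]

theorem select_most_frequent_py_spec : Claim_equal_select_most_frequent_py := by
  intro events field _ hpre
  unfold Spec_select_most_frequent_py select_most_frequent_py select_most_frequent_py_alt
  simp only [aFold_eq, bFold_eq, cFold_counter, bScan_eq]
  generalize events.filterMap (extract field) = ps
  cases hps0 : ps with
  | nil => rfl
  | cons p0 ps' =>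
    subst hps0
    have hitems : (PySem.Dict.counter ((p0 :: ps').map Prod.fst)).items
        = (PySem.Set.ofList ((p0 :: ps').map Prod.fst)).map
            (fun k => (k, ((((p0 :: ps').map Prod.fst).count k : Int)))) :=
      PySem.Dict.items_counter _
    have hmem : p0.1 ∈ PySem.Set.ofList ((p0 :: ps').map Prod.fst) := by
      rw [PySem.Set.mem_ofList]; exact List.mem_map_of_mem (List.mem_cons_self ..)
    obtain ⟨i0, irest, hitems2⟩ :
        ∃ i0 irest, (PySem.Dict.counter ((p0 :: ps').map Prod.fst)).items = i0 :: irest := by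
      cases h : (PySem.Dict.counter ((p0 :: ps').map Prod.fst)).items with
      | nil =>
        rw [h] at hitems
        cases hset : PySem.Set.ofList ((p0 :: ps').map Prod.fst) with
        | nil => rw [hset] at hmem; exact absurd hmem (List.not_mem_nil)
        | cons a t => rw [hset] at hitems; simp at hitems
      | cons a t => exact ⟨a, t, rfl⟩
    have hsize : ¬ (PySem.Dict.counter ((p0 :: ps').map Prod.fst)).size = 0 := by
      show ¬ (PySem.Dict.counter ((p0 :: ps').map Prod.fst)).items.length = 0
      rw [hitems2]; simp
    rw [if_neg hsize, if_neg hsize]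
    -- the head of the stable reverse sort is the first item of maximal count
    have hhead : PySem.List.pyGet?
        (PySem.List.sorted (PySem.Dict.counter ((p0 :: ps').map Prod.fst)).items
          (fun p => p.2) true) 0
        = some (rmax (fun p => p.2) i0 irest) := by
      rw [PySem.List.pyGet?_zero, ← List.head?_eq_getElem?,
        PySem.List.sorted_rev_eq_foldl_insertBy, hitems2, List.foldl_cons]
      have h1 : PySem.List.insertBy (fun a b => decide (b.2 < a.2)) i0 ([] : List (String × Int))
          = [i0] := rfl
      rw [h1, head?_foldl_insertBy _ irest [i0] i0 rfl, rmax_eq_foldl_decide]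
    rw [hhead]
    -- max(counts.values()) is the count of that item
    obtain ⟨b, hm⟩ : ∃ b, PySem.List.max?
        (PySem.Dict.counter ((p0 :: ps').map Prod.fst)).values (fun x => x) = some b := by
      cases h : PySem.List.max? (PySem.Dict.counter ((p0 :: ps').map Prod.fst)).values
          (fun x => x) with
      | none =>
        rw [PySem.List.max?_eq_none_iff] at h
        have : (PySem.Dict.counter ((p0 :: ps').map Prod.fst)).items.map
            (fun p => p.2) = [] := h
        rw [hitems2] at this; simp at this
      | some b => exact ⟨b, rfl⟩
    rw [hm]
    have hmmem : rmax (fun p => p.2) i0 irest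
        ∈ (PySem.Dict.counter ((p0 :: ps').map Prod.fst)).items := by
      rw [hitems2]; exact rmax_mem _ _ _
    have hm2 : b = (rmax (fun p => p.2) i0 irest).2 := by
      have le1 : (rmax (fun p => p.2) i0 irest).2 ≤ b :=
        PySem.List.max?_isMax hm _ (List.mem_map_of_mem hmmem)
      obtain ⟨y, hy, hyb⟩ := List.mem_map.mp (PySem.List.max?_mem hm)
      have le2 : y.2 ≤ (rmax (fun p => p.2) i0 irest).2 :=
        rmax_le (fun p => p.2) i0 irest y (hitems2 ▸ hy)
      omega
    -- locate the first event pair whose count is maximal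
    have hfi : ((PySem.Set.ofList ((p0 :: ps').map Prod.fst)).map
          (fun k => (k, ((((p0 :: ps').map Prod.fst).count k : Int))))).find?
          (fun y => y.2 == (rmax (fun p => p.2) i0 irest).2)
        = some (rmax (fun p => p.2) i0 irest) := by
      rw [← hitems, hitems2]; exact rmax_find? _ _ _
    rw [List.find?_map] at hfi
    obtain ⟨k0, hk0, hfk⟩ := Option.map_eq_some_iff.mp hfi
    rw [← PySem.Set.update_nil_left, update_find? _ _ _ (by simp)] at hk0
    rw [List.find?_map] at hk0
    obtain ⟨pstar, hpf, hp1⟩ := Option.map_eq_some_iff.mp hk0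
    have hm1 : (rmax (fun p => p.2) i0 irest).1 = k0 := by rw [← hfk]
    -- align B's scan predicate with the located pair
    have hpredeq : (fun p : String × String =>
          decide ((PySem.Dict.counter ((p0 :: ps').map Prod.fst)).getD p.1 0 = b))
        = (((fun y => y.2 == (rmax (fun p => p.2) i0 irest).2) ∘
            (fun k => (k, ((((p0 :: ps').map Prod.fst).count k : Int))))) ∘ Prod.fst) := by
      funext p
      show decide (_ = b) = ((((p0 :: ps').map Prod.fst).count p.1 : Int)
          == (rmax (fun p => p.2) i0 irest).2)
      rw [PySem.Dict.getD_counter, hm2]; rfl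
    rw [hpredeq, hpf]
    -- first_src[v] is the id of v's first occurrence = the located pair's id
    have hqp : (((fun y => y.2 == (rmax (fun p => p.2) i0 irest).2) ∘
        (fun k => (k, ((((p0 :: ps').map Prod.fst).count k : Int))))) ∘ Prod.fst) pstar = true :=
      List.find?_some hpf
    have hfirst : (p0 :: ps').find? (fun p => p.1 == pstar.1) = some pstar := by
      apply find?_of_imp _ _ _ _ _ hpf (by simp)
      intro x hx
      have hx1 : x.1 = pstar.1 := by simpa using hx
      show ((((p0 :: ps').map Prod.fst).count x.1 : Int)
          == (rmax (fun p => p.2) i0 irest).2) = true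
      rw [hx1]
      exact hqp
    have hget := fFold_get? (p0 :: ps') PySem.Dict.empty (rmax (fun p => p.2) i0 irest).1
    rw [PySem.Dict.get?_empty, Option.none_or, hm1, ← hp1, hfirst, Option.map_some] at hget
    show (some (rmax (fun p => p.2) i0 irest).1,
        (List.foldl (fun f p => if f.contains p.1 = true then f else f.insert p.1 p.2)
            PySem.Dict.empty (p0 :: ps')).getD (rmax (fun p => p.2) i0 irest).1 "")
      = (some pstar.1, pstar.2)
    rw [PySem.Dict.getD_eq_get?_getD, hm1, ← hp1, hget]
    rfl
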